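-- pv_equiv track=rewrite | github.com/albazzaztariq/UniLogic | Testing/Code for Testing/Advanced/Python/T322_statemachine/test.py | count_transitions
-- ===== SOURCE A (Python) =====
-- def next_state(state, ped_button):
--     if (state == 0):
--         if (ped_button == 1):
--             return 3
--         return 1
--     if (state == 1):
--         if (ped_button == 1):
--             return 2
--         return 2
--     if (state == 2):
--         return 0
--     if (state == 3):
--         return 4
--     if (state == 4):
--         return 0
--     return 0
--
-- def count_transitions(events, event_count):
--     state = 0
--     count = 0
--     prev_state = (-1)
--     i = 0
--     while (i < event_count):
--         if (state != prev_state):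
--             count = (count + 1)
--         prev_state = state
--         state = next_state(state, events[i])
--         i = (i + 1)
--     return count
-- ===== SOURCE B (Python) =====
-- def next_state(state, ped_button):
--     if (state == 0):
--         if (ped_button == 1):
--             return 3
--         return 1
--     if (state == 1):
--         if (ped_button == 1):
--             return 2
--         return 2
--     if (state == 2):
--         return 0
--     if (state == 3):
--         return 4
--     if (state == 4):
--         return 0
--     return 0
--
-- def count_transitions(events, event_count):
--     # materialize the trajectory of visited states, then count maximal runs
--     states = []
--     s = 0
--     i = 0
--     while i < event_count:
--         states.append(s)
--         s = next_state(s, events[i])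
--         i += 1
--     if not states:
--         return 0
--     return 1 + sum(1 for a, b in zip(states, states[1:]) if a != b)
-- ===== Notes on version B (the rewrite author's own statement) =====
-- stated objective: alternative
-- what changed: B first materializes the full trajectory of visited states and then counts maximal runs of equal consecutive states (1 + number of differing adjacent pairs), instead of A's single loop with a prev_state=-1 sentinel incrementing a counter in-flight.
import Mathlib
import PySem

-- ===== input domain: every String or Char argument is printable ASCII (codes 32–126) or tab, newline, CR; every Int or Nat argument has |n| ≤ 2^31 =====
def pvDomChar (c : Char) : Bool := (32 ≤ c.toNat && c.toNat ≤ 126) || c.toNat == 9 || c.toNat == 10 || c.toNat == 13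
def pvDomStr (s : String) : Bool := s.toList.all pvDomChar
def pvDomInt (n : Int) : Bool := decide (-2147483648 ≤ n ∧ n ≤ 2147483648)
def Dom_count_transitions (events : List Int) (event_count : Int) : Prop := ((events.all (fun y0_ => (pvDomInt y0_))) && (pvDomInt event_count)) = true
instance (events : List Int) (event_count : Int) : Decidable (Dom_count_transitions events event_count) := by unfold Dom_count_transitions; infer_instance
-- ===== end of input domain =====

-- B builds the trajectory of visited states and counts maximal runs of equal
-- consecutive states, replacing A's in-flight counter with prev_state sentinel
-- (objective: alternative decomposition, same O(n) cost).

-- ===== PORT A =====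
def next_state (state : Int) (ped_button : Int) : Int :=
  if state = 0 then (if ped_button = 1 then 3 else 1)
  else if state = 1 then (if ped_button = 1 then 2 else 2)
  else if state = 2 then 0
  else if state = 3 then 4
  else if state = 4 then 0
  else 0

-- A's while loop; the 'none' branch is the IndexError case, excluded by Pre_.
def loopA (events : List Int) (event_count : Int) (state count prev_state i : Int) : Int :=
  if _h : i < event_count then
    let count' := if state ≠ prev_state then count + 1 else count
    match PySem.List.pyGet? events i with
    | some e => loopA events event_count (next_state state e) count' state (i + 1)
    | none => count'
  else count
termination_by (event_count - i).toNat
decreasing_by omega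

def count_transitions (events : List Int) (event_count : Int) : Int :=
  loopA events event_count 0 0 (-1) 0

-- ===== PORT B =====
-- the while loop of Source B that appends the current state for each event
def trajB (events : List Int) (event_count : Int) (s i : Int) : List Int :=
  if _h : i < event_count then
    match PySem.List.pyGet? events i with
    | some e => s :: trajB events event_count (next_state s e) (i + 1)
    | none => [s]
  else []
termination_by (event_count - i).toNat
decreasing_by omega

def count_transitions_alt (events : List Int) (event_count : Int) : Int :=
  match trajB events event_count 0 0 with
  | [] => 0
  | states => 1 + (((states.zip states.tail).filter (fun p => p.1 ≠ p.2)).length : Int)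

-- ===== PRECONDITION & SPEC =====
-- Pre_ excludes event_count > len(events), where A (and B) raise IndexError.
def Pre_count_transitions (events : List Int) (event_count : Int) : Prop :=
  event_count ≤ (events.length : Int)
instance (events : List Int) (event_count : Int) : Decidable (Pre_count_transitions events event_count) := by unfold Pre_count_transitions; infer_instance

def pvWitness_count_transitions : List Int × Int := ([1, 0, 1], 3)

def Spec_count_transitions (events : List Int) (event_count : Int) (out : Int) : Prop := out = count_transitions_alt events event_count
instance (events : List Int) (event_count : Int) (out : Int) : Decidable (Spec_count_transitions events event_count out) := by unfold Spec_count_transitions; infer_instance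

-- ===== CLAIM (what is proved, stated in full; the proofs are below) =====
def Claim_equal_count_transitions : Prop := ∀ (events : List Int) (event_count : Int), Dom_count_transitions events event_count → Pre_count_transitions events event_count → Spec_count_transitions events event_count (count_transitions events event_count)

-- ===== LEMMAS AND PROOFS =====

lemma next_state_ne (s e : Int) : next_state s e ≠ s := by
  unfold next_state; split_ifs <;> omega

-- A's loop counts one per iteration: state always changes, prev starts distinct
lemma loopA_eq (n : Nat) : ∀ (events : List Int) (ec s c p i : Int),
    (ec - i).toNat = n → 0 ≤ i → ec ≤ (events.length : Int) → s ≠ p →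
    loopA events ec s c p i = c + ((ec - i).toNat : Int) := by
  induction n with
  | zero =>
    intro events ec s c p i hn _ _ _
    rw [loopA]; have : ¬ i < ec := by omega
    simp [this, hn]
  | succ m ih =>
    intro events ec s c p i hn hi hle hsp
    rw [loopA]
    have hlt : i < ec := by omega
    have hget : PySem.List.pyGet? events i = some events[i.toNat] := by
      apply PySem.List.pyGet?_eq_some_getElem <;> omega
    simp only [dif_pos hlt, hget, if_pos hsp]
    rw [ih events ec _ _ _ _ (by omega) (by omega) hle (next_state_ne s _)]
    omega

-- B's trajectory: one state per iteration, and all adjacent states differ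
lemma traj_spec (n : Nat) : ∀ (events : List Int) (ec s i : Int),
    (ec - i).toNat = n → 0 ≤ i → ec ≤ (events.length : Int) →
    (trajB events ec s i).length = n ∧
    (((trajB events ec s i).zip (trajB events ec s i).tail).filter
        (fun p => p.1 ≠ p.2)).length = n - 1 ∧
    (trajB events ec s i).head? = (if n = 0 then none else some s) := by
  induction n with
  | zero =>
    intro events ec s i hn _ _
    rw [trajB]; have : ¬ i < ec := by omega
    simp [this]
  | succ m ih =>
    intro events ec s i hn hi hle
    have hlt : i < ec := by omega
    have hget : PySem.List.pyGet? events i = some events[i.toNat] := by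
      apply PySem.List.pyGet?_eq_some_getElem <;> omega
    have hcons : trajB events ec s i
        = s :: trajB events ec (next_state s events[i.toNat]) (i + 1) := by
      rw [trajB]; simp [hlt, hget]
    obtain ⟨hlen, hfilt, hhead⟩ :=
      ih events ec (next_state s events[i.toNat]) (i + 1) (by omega) (by omega) hle
    rw [hcons]
    refine ⟨by simp [hlen], ?_, by simp⟩
    rcases hrest : trajB events ec (next_state s events[i.toNat]) (i + 1) with _ | ⟨a, t⟩
    · simp [hrest] at hlen ⊢
      omega
    · rw [hrest] at hlen hfilt hhead
      have hm : ¬ m = 0 := by simp at hlen; omega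
      rw [if_neg hm] at hhead
      have ha : a = next_state s events[i.toNat] := by
        simpa using hhead
      have hne : s ≠ a := by rw [ha]; exact (Ne.symm (next_state_ne s _))
      simp only [List.tail_cons] at hfilt ⊢
      rw [show ((s :: a :: t).zip (a :: t)) = (s, a) :: ((a :: t).zip t) from rfl]
      rw [List.filter_cons, if_pos (by simpa using hne), List.length_cons]
      omega

-- ===== VERDICT (by name: the statement is the Claim_ definition above) =====
theorem count_transitions_spec : Claim_equal_count_transitions := by
  intro events ec _ hpre
  unfold Spec_count_transitions count_transitions count_transitions_alt
  rw [loopA_eq ((ec - 0).toNat) events ec 0 0 (-1) 0 rfl (by omega) hpre (by omega)]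
  obtain ⟨hlen, hfilt, hhead⟩ := traj_spec ((ec - 0).toNat) events ec 0 0 rfl (by omega) hpre
  rcases htr : trajB events ec 0 0 with _ | ⟨a, t⟩
  · rw [htr] at hlen
    simp at hlen ⊢
    omega
  · rw [htr] at hlen hfilt
    simp only []
    have : ((List.filter (fun p => decide (p.1 ≠ p.2)) ((a :: t).zip (a :: t).tail)).length : Int)
        = ((ec - 0).toNat : Int) - 1 := by
      rw [hfilt]; simp at hlen; omega
    rw [this]
    omega
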